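-- pv_equiv track=rewrite | github.com/ElleryAree/adventofcode | advent22/17_tetris.py | find_same
-- ===== SOURCE A (Python) =====
-- def check_window(num_cave, window, i):
--     if i + len(window) >= len(num_cave):
--         return False
--
--     for l in range(len(window)):
--         if num_cave[i + l] != window[l]:
--             return False
--     return True
--
-- def find_window(num_cave, start, window):
--     matches = []
--
--     for i in range(start, len(num_cave)):
--         if check_window(num_cave, window, i):
--             matches.append((i - 1, i - 1 + len(window)))
--
--     return matches
--
-- def find_same(num_cave, window_size):
--     window = []
--
--     for i in range(len(num_cave)):
--         if len(window) < window_size: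
--             window.append(num_cave[i])
--             continue
--
--         matches = find_window(num_cave, i + 1, window)
--         if len(matches) > 0:
--             return matches, window
--
--         window.pop(0)
--         window.append(num_cave[i])
-- ===== SOURCE B (Python) =====
-- def find_same(num_cave, window_size):
--     w = max(window_size, 0)
--     n = len(num_cave)
--     occ = {}
--     for j in range(n - w):
--         occ.setdefault(tuple(num_cave[j:j + w]), []).append(j)
--     for p in range(n - w):
--         key = tuple(num_cave[p:p + w])
--         js = [j for j in occ[key] if j > p + w]
--         if js:
--             return [(j - 1, j - 1 + w) for j in js], list(key)
--     return None
-- ===== Notes on version B (the rewrite author's own statement) =====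
-- stated objective: alternative
-- what changed: B builds one dictionary mapping each length-w window (as a tuple) to the ordered list of its occurrence positions in a single pass, then scans window start positions answering each from that precomputed index, instead of A's per-position rescan of the whole remaining list.
import Mathlib
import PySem

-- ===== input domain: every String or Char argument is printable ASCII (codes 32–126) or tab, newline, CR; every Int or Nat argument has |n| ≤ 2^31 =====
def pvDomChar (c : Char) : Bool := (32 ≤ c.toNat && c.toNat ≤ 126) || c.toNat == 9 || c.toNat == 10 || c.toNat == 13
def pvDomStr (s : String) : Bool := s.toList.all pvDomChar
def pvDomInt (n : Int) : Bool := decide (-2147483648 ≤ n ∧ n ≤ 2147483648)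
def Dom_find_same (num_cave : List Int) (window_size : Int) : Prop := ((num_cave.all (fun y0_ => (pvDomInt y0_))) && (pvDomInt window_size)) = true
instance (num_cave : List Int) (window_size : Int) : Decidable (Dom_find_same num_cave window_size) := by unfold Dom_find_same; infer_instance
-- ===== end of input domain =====

-- B answers each window position from one precomputed dictionary of window occurrences instead of A's per-position rescan; return values proved equal on Pre_.

-- ===== PORT A =====
def check_window (num_cave window : List Int) (i : Int) : Bool :=
  if (num_cave.length : Int) ≤ i + (window.length : Int) then false
  else
    -- 'for l in range(len(window)): if …: return False / return True' = all indices match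
    (PySem.List.pyRange 0 (window.length : Int) 1).all
      (fun l => PySem.List.pyGetD num_cave (i + l) 0 == PySem.List.pyGetD window l 0)

def find_window (num_cave : List Int) (start : Int) (window : List Int) : List (Int × Int) :=
  (PySem.List.pyRange start (num_cave.length : Int) 1).foldl
    (fun ms i =>
      if check_window num_cave window i then ms ++ [(i - 1, i - 1 + (window.length : Int))]
      else ms) []

def find_same_go (num_cave : List Int) (window_size : Int) :
    List Int → List Int → Option ((List (Int × Int)) × List Int)
  | _window, [] => none
  | window, i :: rest =>
    if ((window.length : Int)) < window_size then
      find_same_go num_cave window_size (window ++ [PySem.List.pyGetD num_cave i 0]) rest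
    else
      let ms := find_window num_cave (i + 1) window
      if 0 < ms.length then some (ms, window)
      else
        -- window.pop(0); window.append(num_cave[i])  (pop(0) raises on empty window: excluded by Pre_)
        find_same_go num_cave window_size (window.drop 1 ++ [PySem.List.pyGetD num_cave i 0]) rest

def find_same (num_cave : List Int) (window_size : Int) : Option ((List (Int × Int)) × List Int) :=
  find_same_go num_cave window_size [] (PySem.List.pyRange 0 (num_cave.length : Int) 1)

-- ===== PORT B =====
def fs_occ (num_cave : List Int) (w : Int) : PySem.Dict (List Int) (List Int) :=
  (PySem.List.pyRange 0 ((num_cave.length : Int) - w) 1).foldl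
    (fun d j => d.modify (PySem.List.slice num_cave (some j) (some (j + w))) [] (· ++ [j]))
    PySem.Dict.empty

def fs_alt_go (num_cave : List Int) (w : Int) (occ : PySem.Dict (List Int) (List Int)) :
    List Int → Option ((List (Int × Int)) × List Int)
  | [] => none
  | p :: rest =>
    let key := PySem.List.slice num_cave (some p) (some (p + w))
    let js := (occ.getD key []).filter (fun j => decide (p + w < j))
    if js.isEmpty then fs_alt_go num_cave w occ rest
    else some (js.map (fun j => (j - 1, j - 1 + w)), key)

def find_same_alt (num_cave : List Int) (window_size : Int) : Option ((List (Int × Int)) × List Int) :=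
  let w := max window_size 0
  let n := (num_cave.length : Int)
  fs_alt_go num_cave w (fs_occ num_cave w) (PySem.List.pyRange 0 (n - w) 1)

-- ===== PRECONDITION & SPEC =====
-- Pre_ excludes exactly the inputs (window_size ≤ 0 with a one-element list) on which A raises
-- IndexError from 'window.pop(0)' on the empty window.
def Pre_find_same (num_cave : List Int) (window_size : Int) : Prop :=
  ¬ (window_size ≤ 0 ∧ num_cave.length = 1)
instance (num_cave : List Int) (window_size : Int) : Decidable (Pre_find_same num_cave window_size) := by
  unfold Pre_find_same; infer_instance

def pvWitness_find_same : List Int × Int := ([1, 2, 1, 2, 1, 2, 9], 2)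

def Spec_find_same (num_cave : List Int) (window_size : Int) (out : Option ((List (Int × Int)) × List Int)) : Prop := out = find_same_alt num_cave window_size
instance (num_cave : List Int) (window_size : Int) (out : Option ((List (Int × Int)) × List Int)) : Decidable (Spec_find_same num_cave window_size out) := by unfold Spec_find_same; infer_instance

-- ===== CLAIM (what is proved, stated in full; the proofs are below) =====
def Claim_equal_find_same : Prop := ∀ (num_cave : List Int) (window_size : Int), Dom_find_same num_cave window_size → Pre_find_same num_cave window_size → Spec_find_same num_cave window_size (find_same num_cave window_size)


-- ===== LEMMAS AND PROOFS =====

-- length of a slice nc[p:p+w] fully inside the list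
theorem pv_len_slice (nc : List Int) (p w : Int) (hp : 0 ≤ p) (hw : 0 ≤ w)
    (hpn : p + w ≤ (nc.length : Int)) :
    ((PySem.List.slice nc (some p) (some (p + w))).length : Int) = w := by
  rw [PySem.List.slice_toNat nc hp (by omega)]
  simp [List.length_take, List.length_drop]
  omega

-- check_window is "window fits strictly before the end ∧ the slice equals the window"
theorem pv_check_window_eq (nc window : List Int) (i : Int) (hi : 0 ≤ i) :
    check_window nc window i =
      (decide ((i + (window.length : Int)) < (nc.length : Int)) &&
       (PySem.List.slice nc (some i) (some (i + (window.length : Int))) == window)) := by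
  unfold check_window
  by_cases hle : (nc.length : Int) ≤ i + (window.length : Int)
  · rw [if_pos hle]
    simp [show ¬ (i + (window.length : Int) < (nc.length : Int)) by omega]
  · push_neg at hle
    simp only [if_neg (by omega : ¬ (nc.length : Int) ≤ i + (window.length : Int))]
    rw [decide_eq_true (by omega : i + (window.length : Int) < (nc.length : Int)), Bool.true_and]
    rw [PySem.List.slice_toNat nc hi (by omega)]
    have harith : (i + (window.length : Int)).toNat - i.toNat = window.length := by omega
    rw [harith]
    have hlen : (List.take window.length (List.drop i.toNat nc)).length = window.length := by
      simp [List.length_take, List.length_drop]; omega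
    rcases hall : (PySem.List.pyRange 0 (window.length : Int) 1).all
        (fun l => PySem.List.pyGetD nc (i + l) 0 == PySem.List.pyGetD window l 0) with _ | _
    · -- all = false: slice ≠ window
      symm
      rw [beq_eq_false_iff_ne]
      intro hEq
      rw [List.all_eq_false] at hall
      obtain ⟨l, hmem, hne⟩ := hall
      rw [PySem.List.mem_pyRange_one] at hmem
      apply hne
      have hlt : l.toNat < window.length := by omega
      rw [PySem.List.pyGetD_eq_getElem nc 0 (by omega) (by omega),
          PySem.List.pyGetD_eq_getElem window 0 (by omega) (by push_cast; omega)]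
      simp only [beq_iff_eq]
      have := congrArg (fun xs => xs[l.toNat]?) hEq
      simp only [List.getElem?_take, List.getElem?_drop] at this
      rw [if_pos hlt] at this
      have h1 : i.toNat + l.toNat < nc.length := by omega
      have h2 : (i + l).toNat = i.toNat + l.toNat := by omega
      rw [List.getElem?_eq_getElem h1, List.getElem?_eq_getElem (by omega : l.toNat < window.length)] at this
      have hv := Option.some_injective _ this
      simpa [h2] using hv
    · -- all = true: slice = window
      symm
      rw [beq_iff_eq]
      apply List.ext_getElem (by rw [hlen])
      intro k hk1 hk2
      rw [List.all_eq_true] at hall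
      have hkw : k < window.length := hk2
      have := hall (k : Int) (by rw [PySem.List.mem_pyRange_one]; constructor <;> [omega; exact_mod_cast hkw])
      rw [PySem.List.pyGetD_eq_getElem nc 0 (by omega) (by push_cast; omega),
          PySem.List.pyGetD_eq_getElem window 0 (by omega) (by push_cast; omega)] at this
      simp only [beq_iff_eq] at this
      have h2 : (i + (k : Int)).toNat = i.toNat + k := by omega
      simp only [List.getElem_take, List.getElem_drop]
      simp only [h2] at this
      simpa using this

-- find_window as filter+map
theorem pv_find_window_eq (nc window : List Int) (start : Int) :
    find_window nc start window =
      ((PySem.List.pyRange start (nc.length : Int) 1).filter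
          (fun i => check_window nc window i)).map
        (fun i => (i - 1, i - 1 + (window.length : Int))) := by
  unfold find_window
  have h := PySem.List.foldl_append_if (fun i => check_window nc window i)
    (fun i => (i - 1, i - 1 + (window.length : Int)))
    (PySem.List.pyRange start (nc.length : Int) 1) []
  simpa using h

-- grouping loop: the final dict maps each key to the positions carrying it, in order
theorem pv_getD_foldl_modify (g : Int → List Int) (l : List Int) (c : List Int) :
    ∀ d : PySem.Dict (List Int) (List Int),
      (l.foldl (fun d j => d.modify (g j) [] (· ++ [j])) d).getD c [] =
        d.getD c [] ++ l.filter (fun j => g j == c) := by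
  induction l with
  | nil => intro d; simp
  | cons j l ih =>
    intro d
    rw [List.foldl_cons, ih, List.filter_cons, PySem.Dict.getD_modify]
    by_cases hc : c = g j
    · rw [if_pos hc, if_pos (by simp [hc]), hc]
      simp
    · rw [if_neg hc, if_neg (by simp [Ne.symm hc])]

-- the occurrence dictionary groups positions by their window slice
theorem pv_occ_getD (nc : List Int) (w : Int) (key : List Int) :
    (fs_occ nc w).getD key [] =
      (PySem.List.pyRange 0 ((nc.length : Int) - w) 1).filter
        (fun j => PySem.List.slice nc (some j) (some (j + w)) == key) := by
  unfold fs_occ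
  rw [pv_getD_foldl_modify (fun j => PySem.List.slice nc (some j) (some (j + w)))]
  simp

-- filtering a range with lower bound a equals filtering [0,b) with the bound added
theorem pv_filter_range_lb (a b : Int) (P : Int → Bool) (ha : 0 ≤ a) :
    (PySem.List.pyRange a b 1).filter P =
      (PySem.List.pyRange 0 b 1).filter (fun j => decide (a ≤ j) && P j) := by
  rcases le_or_gt a b with hab | hab
  · rw [PySem.List.pyRange_one_append 0 a b ha hab, List.filter_append]
    have h1 : (PySem.List.pyRange 0 a 1).filter (fun j => decide (a ≤ j) && P j) = [] := by
      rw [List.filter_eq_nil_iff]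
      intro j hj
      rw [PySem.List.mem_pyRange_one] at hj
      simp [show ¬ (a ≤ j) by omega]
    rw [h1, List.nil_append]
    apply List.filter_congr
    intro j hj
    rw [PySem.List.mem_pyRange_one] at hj
    simp [show a ≤ j by omega]
  · rw [PySem.List.pyRange_one_eq_nil (by omega : b ≤ a)]
    simp only [List.filter_nil]
    symm
    rw [List.filter_eq_nil_iff]
    intro j hj
    rw [PySem.List.mem_pyRange_one] at hj
    simp [show ¬ (a ≤ j) by omega]

-- filtering [0,c) equals filtering [0,b) (c ≤ b) with the upper bound added
theorem pv_filter_range_ub (c b : Int) (P : Int → Bool) (hcb : c ≤ b) :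
    (PySem.List.pyRange 0 c 1).filter P =
      (PySem.List.pyRange 0 b 1).filter (fun j => decide (j < c) && P j) := by
  rcases le_or_gt 0 c with hc | hc
  · rw [PySem.List.pyRange_one_append 0 c b hc hcb, List.filter_append]
    have h2 : (PySem.List.pyRange c b 1).filter (fun j => decide (j < c) && P j) = [] := by
      rw [List.filter_eq_nil_iff]
      intro j hj
      rw [PySem.List.mem_pyRange_one] at hj
      simp [show ¬ (j < c) by omega]
    rw [h2, List.append_nil]
    apply List.filter_congr
    intro j hj
    rw [PySem.List.mem_pyRange_one] at hj
    simp [show j < c by omega]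
  · rw [PySem.List.pyRange_one_eq_nil (by omega : c ≤ 0)]
    simp only [List.filter_nil]
    symm
    rw [List.filter_eq_nil_iff]
    intro j hj
    rw [PySem.List.mem_pyRange_one] at hj
    simp [show ¬ (j < c) by omega]

-- the per-position match lists of A and B coincide
theorem pv_ms_eq (nc : List Int) (w p : Int) (hw : 0 ≤ w) (hp : 0 ≤ p)
    (hpn : p + w ≤ (nc.length : Int)) :
    find_window nc (p + w + 1) (PySem.List.slice nc (some p) (some (p + w))) =
      (((fs_occ nc w).getD (PySem.List.slice nc (some p) (some (p + w))) []).filter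
          (fun j => decide (p + w < j))).map (fun j => (j - 1, j - 1 + w)) := by
  set key := PySem.List.slice nc (some p) (some (p + w)) with hkeydef
  have hkey : ((key.length : Int)) = w := pv_len_slice nc p w hp hw hpn
  rw [pv_find_window_eq, pv_occ_getD, hkey, List.filter_filter]
  rw [pv_filter_range_lb (p + w + 1) (nc.length : Int) _ (by omega)]
  rw [pv_filter_range_ub ((nc.length : Int) - w) (nc.length : Int) _ (by omega)]
  congr 1
  apply List.filter_congr
  intro j hj
  rw [PySem.List.mem_pyRange_one] at hj
  rw [pv_check_window_eq nc key j (by omega), hkey]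
  rcases heq : (PySem.List.slice nc (some j) (some (j + w)) == key) with _ | _
  · simp
  · simp only [heq, Bool.and_true, Bool.true_and]
    rcases le_or_gt (p + w + 1) j with h | h
    · simp [show p + w + 1 ≤ j from h, show p + w < j by omega]
      constructor <;> intro <;> omega
    · simp [show ¬ (p + w + 1 ≤ j) by omega, show ¬ (p + w < j) by omega]

-- sliding the window one step: drop the head, append the next element
theorem pv_pop_step (nc : List Int) (p w : Int) (hp : 0 ≤ p) (hw : 0 < w)
    (hpn : p + w < (nc.length : Int)) :
    (PySem.List.slice nc (some p) (some (p + w))).drop 1 ++ [PySem.List.pyGetD nc (p + w) 0] =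
      PySem.List.slice nc (some (p + 1)) (some (p + 1 + w)) := by
  rw [PySem.List.slice_toNat nc hp (by omega), PySem.List.slice_toNat nc (by omega) (by omega)]
  have h1 : (p + w).toNat - p.toNat = w.toNat := by omega
  have h2 : (p + 1 + w).toNat - (p + 1).toNat = w.toNat := by omega
  rw [h1, h2]
  rw [List.drop_take, List.drop_drop]
  have h3 : (p + 1).toNat = p.toNat + 1 := by omega
  rw [h3]
  have h4 : w.toNat = (w.toNat - 1) + 1 := by omega
  rw [PySem.List.pyGetD_eq_getElem nc 0 (by omega) (by omega)]
  conv_rhs => rw [h4]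
  rw [List.take_succ]
  congr 1
  rw [List.getElem?_drop, List.getElem?_eq_getElem (by omega : p.toNat + 1 + (w.toNat - 1) < nc.length)]
  simp only [Option.toList_some]
  have hidx : (p + w).toNat = p.toNat + 1 + (w.toNat - 1) := by omega
  simp [hidx]

theorem pv_phase2 (nc : List Int) (ws w : Int) (hw : w = max ws 0) (hwpos : 0 < w)
    (hn : w ≤ (nc.length : Int)) :
    ∀ (m : Nat) (p : Int), 0 ≤ p → p + w ≤ (nc.length : Int) →
      m = ((nc.length : Int) - w - p).toNat →
      find_same_go nc ws (PySem.List.slice nc (some p) (some (p + w)))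
          (PySem.List.pyRange (p + w) (nc.length : Int) 1) =
        fs_alt_go nc w (fs_occ nc w) (PySem.List.pyRange p ((nc.length : Int) - w) 1) := by
  intro m
  induction m with
  | zero =>
    intro p hp hpn hm
    have hpe : p = (nc.length : Int) - w := by omega
    rw [PySem.List.pyRange_one_eq_nil (by omega : (nc.length : Int) ≤ p + w)]
    rw [PySem.List.pyRange_one_eq_nil (by omega : (nc.length : Int) - w ≤ p)]
    rfl
  | succ m ih =>
    intro p hp hpn hm
    have hplt : p + w < (nc.length : Int) := by omega
    rw [PySem.List.pyRange_one_cons (by omega : p + w < (nc.length : Int))]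
    rw [PySem.List.pyRange_one_cons (by omega : p < (nc.length : Int) - w)]
    rw [find_same_go, fs_alt_go]
    have hlen : ((PySem.List.slice nc (some p) (some (p + w))).length : Int) = w :=
      pv_len_slice nc p w hp (by omega) hpn
    rw [if_neg (by rw [hlen]; omega)]
    simp only
    rw [pv_ms_eq nc w p (by omega) hp hpn]
    rcases hjs : (((fs_occ nc w).getD (PySem.List.slice nc (some p) (some (p + w))) []).filter
        (fun j => decide (p + w < j))) with _ | ⟨j0, js'⟩
    · simp only [List.map_nil, List.length_nil, List.isEmpty_nil]
      rw [if_neg (by omega)]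
      simp only [if_true]
      rw [pv_pop_step nc p w hp hwpos hplt]
      have harr : p + w + 1 = (p + 1) + w := by ring
      rw [harr]
      exact ih (p + 1) (by omega) (by omega) (by omega)
    · simp only [List.map_cons, List.length_cons, List.isEmpty_cons]
      rw [if_pos (by omega), if_neg (by simp)]

theorem pv_fill_step (nc : List Int) (ws : Int) (j : Nat) (hj : j < nc.length)
    (hjw : (j : Int) < ws) :
    find_same_go nc ws (nc.take j) (PySem.List.pyRange (j : Int) (nc.length : Int) 1) =
      find_same_go nc ws (nc.take (j + 1))
        (PySem.List.pyRange ((j : Int) + 1) (nc.length : Int) 1) := by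
  rw [PySem.List.pyRange_one_cons (by exact_mod_cast hj)]
  rw [find_same_go]
  rw [if_pos (by simp [List.length_take]; omega)]
  congr 1
  rw [List.take_succ]
  congr 1
  rw [PySem.List.pyGetD_eq_getElem nc 0 (by omega) (by exact_mod_cast hj)]
  rw [List.getElem?_eq_getElem hj]
  simp

theorem pv_fill (nc : List Int) (ws : Int) :
    ∀ (k : Nat), k ≤ nc.length → (k : Int) ≤ max ws 0 →
      find_same_go nc ws [] (PySem.List.pyRange 0 (nc.length : Int) 1) =
        find_same_go nc ws (nc.take k) (PySem.List.pyRange (k : Int) (nc.length : Int) 1) := by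
  intro k
  induction k with
  | zero => intro _ _; simp
  | succ k ih =>
    intro hk hkw
    rw [ih (by omega) (by push_cast at hkw ⊢; omega)]
    rw [pv_fill_step nc ws k (by omega) (by push_cast at hkw; omega)]
    have hc : (((k + 1 : Nat)) : Int) = (k : Int) + 1 := by push_cast; ring
    rw [hc]

theorem main_eq (nc : List Int) (ws : Int)
    (hpre : Pre_find_same nc ws) :
    find_same nc ws = find_same_alt nc ws := by
  unfold find_same find_same_alt
  show find_same_go nc ws [] (PySem.List.pyRange 0 (nc.length : Int) 1) =
    fs_alt_go nc (max ws 0) (fs_occ nc (max ws 0))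
      (PySem.List.pyRange 0 ((nc.length : Int) - max ws 0) 1)
  by_cases hwn : (nc.length : Int) < max ws 0
  · -- the window never fills: both sides return none
    rw [pv_fill nc ws nc.length le_rfl (by omega)]
    rw [List.take_length]
    rw [PySem.List.pyRange_one_eq_nil (le_refl ((nc.length : Int)))]
    rw [PySem.List.pyRange_one_eq_nil (by omega : (nc.length : Int) - max ws 0 ≤ 0)]
    rfl
  · push_neg at hwn
    by_cases hw0 : 0 < max ws 0
    · -- positive window: fill phase, then the sliding phase
      rw [pv_fill nc ws (max ws 0).toNat (by omega) (by omega)]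
      have htake : nc.take (max ws 0).toNat
          = PySem.List.slice nc (some 0) (some (0 + max ws 0)) := by
        rw [PySem.List.slice_toNat nc le_rfl (by omega)]
        have ha : (0 + max ws 0).toNat - Int.toNat 0 = (max ws 0).toNat := by omega
        rw [ha, show Int.toNat 0 = 0 from rfl, List.drop_zero]
      have hrange : (((max ws 0).toNat : Int)) = 0 + max ws 0 := by omega
      rw [htake, hrange]
      exact pv_phase2 nc ws (max ws 0) rfl hw0 hwn
        (((nc.length : Int) - max ws 0 - 0).toNat) 0 le_rfl (by omega) rfl
    · -- window size ≤ 0: the empty window matches everywhere; Pre_ rules out length 1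
      have hw : max ws 0 = 0 := by omega
      have hws : ws ≤ 0 := by omega
      rw [hw]
      have hlen1 : nc.length ≠ 1 := fun h => hpre ⟨hws, h⟩
      by_cases h0 : nc.length = 0
      · rw [PySem.List.pyRange_one_eq_nil (by rw [h0]; norm_num : (nc.length : Int) ≤ 0)]
        rw [PySem.List.pyRange_one_eq_nil (by rw [h0]; norm_num : (nc.length : Int) - 0 ≤ 0)]
        rfl
      · have h2 : 2 ≤ nc.length := by omega
        have hn2 : (2 : Int) ≤ (nc.length : Int) := by exact_mod_cast h2
        rw [PySem.List.pyRange_one_cons (by omega : (0 : Int) < (nc.length : Int))]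
        rw [PySem.List.pyRange_one_cons (by omega : (0 : Int) < (nc.length : Int) - 0)]
        rw [find_same_go, fs_alt_go]
        rw [if_neg (by simp; omega)]
        simp only
        have hsl : PySem.List.slice nc (some 0) (some ((0 : Int) + 0)) = [] := by
          rw [PySem.List.slice_toNat nc le_rfl (by omega)]
          simp
        have hms := pv_ms_eq nc 0 0 le_rfl le_rfl (by omega)
        rw [hsl] at hms
        have hjmem : (1 : Int) ∈ ((fs_occ nc 0).getD [] []).filter
            (fun j => decide ((0 : Int) + 0 < j)) := by
          rw [pv_occ_getD, List.mem_filter, List.mem_filter]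
          refine ⟨⟨?_, ?_⟩, ?_⟩
          · rw [PySem.List.mem_pyRange_one]; omega
          · rw [PySem.List.slice_toNat nc (by omega) (by omega)]
            simp
          · simp
        have hjs : ((fs_occ nc 0).getD [] []).filter
            (fun j => decide ((0 : Int) + 0 < j)) ≠ [] := List.ne_nil_of_mem hjmem
        have hsl2 : PySem.List.slice nc (some 0) (some (0 : Int)) = [] := by
          rw [PySem.List.slice_toNat nc le_rfl le_rfl]
          simp
        simp only [add_zero, zero_add] at hms hjs hjmem ⊢
        rw [hsl2, hms]
        have hex : ∃ x ∈ (fs_occ nc 0).getD [] [], 0 < x :=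
          ⟨1, (List.mem_filter.mp hjmem).1, by norm_num⟩
        rw [if_pos (by simp [List.length_pos_iff]; exact hex)]
        rw [if_neg (by simp [List.isEmpty_iff]; exact hex)]

-- ===== VERDICT (by name: the statement is the Claim_ definition above) =====
theorem find_same_spec : Claim_equal_find_same := by
  intro nc ws _ hpre
  exact main_eq nc ws hpre
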